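-- pv_equiv track=rewrite | github.com/personal-algorithm-study/boj-java | programmers/python/level2/problem142085.py | solution
-- ===== SOURCE A (Python) =====
-- import heapq
--
-- def solution(n, k, enemy):
--     answer, length = 0, len(enemy)
--     heap = []
--
--     for i in range(length):
--         heapq.heappush(heap, -enemy[i])
--         n -= enemy[i]
--
--         if n < 0:
--             if k <= 0:
--                 break
--             k -= 1
--             n += -heapq.heappop(heap)
--         answer += 1
--     return answer
-- ===== SOURCE B (Python) =====
-- def solution(n, k, enemy):
--     paid = []                 # costs currently paid out of n, in arrival order
--     i = 0
--     while i < len(enemy):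
--         e = enemy[i]
--         paid.append(e)
--         if e <= n:
--             n -= e
--         elif k > 0:
--             k -= 1
--             m = max(paid)     # a skip refunds the most expensive fight so far
--             paid.remove(m)
--             n += m - e
--         else:
--             return i          # cannot pay and no skips left: i rounds survived
--         i += 1
--     return i
-- ===== Notes on version B (the rewrite author's own statement) =====
-- stated objective: alternative
-- what changed: Drops A's incrementally-maintained heap of negated values and the answer accumulator: B appends every cost to a plain list and only on a deficit round (at most k+1 times per run, since each one consumes a skip or ends the loop) computes max()/remove() to refund the most expensive fight, returning the round index itself via early return instead of break-and-count.
import Mathlib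
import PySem

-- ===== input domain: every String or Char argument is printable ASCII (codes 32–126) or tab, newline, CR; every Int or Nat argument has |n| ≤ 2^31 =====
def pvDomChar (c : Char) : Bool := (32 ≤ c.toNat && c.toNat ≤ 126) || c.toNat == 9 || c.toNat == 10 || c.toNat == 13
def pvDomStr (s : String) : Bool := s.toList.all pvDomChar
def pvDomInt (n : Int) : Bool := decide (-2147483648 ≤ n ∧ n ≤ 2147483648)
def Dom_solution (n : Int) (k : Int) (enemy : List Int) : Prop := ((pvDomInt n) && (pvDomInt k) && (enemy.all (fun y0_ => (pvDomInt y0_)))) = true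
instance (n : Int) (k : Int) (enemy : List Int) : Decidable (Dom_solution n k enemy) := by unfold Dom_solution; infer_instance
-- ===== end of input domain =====

-- B drops A's heap of negated values and answer accumulator: it appends each cost to a plain
-- list and only on a deficit round (at most k+1 times in a whole run) computes max()/remove()
-- to refund the most expensive fight, returning the round index itself as the answer.

-- ===== PORT A =====
-- A's heap is ported by heapq's contract: the heap list holds the pushed (negated) values as a
-- multiset; heappush adds the value, heappop returns and removes the minimum (exact for what A
-- observes: only the popped values ever reach n or answer).
def solutionGoA (rest : List Int) (n : Int) (k : Int) (heap : List Int) (ans : Int) : Int :=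
  match rest with
  | [] => ans
  | e :: rest =>
    let heap' := (-e) :: heap        -- heapq.heappush(heap, -enemy[i])
    let n' := n - e                  -- n -= enemy[i]
    if n' < 0 then
      if k ≤ 0 then ans              -- break
      else
        match PySem.List.min? heap' (fun y => y) with   -- heapq.heappop(heap)
        | some m => solutionGoA rest (n' + (-m)) (k - 1) (heap'.erase m) (ans + 1)
        | none => ans                -- unreachable: heap' is a cons, min? ≠ none
    else solutionGoA rest n' k heap' (ans + 1)

def solution (n : Int) (k : Int) (enemy : List Int) : Int :=
  solutionGoA enemy n k [] 0

-- ===== PORT B =====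
-- max(paid) → PySem.List.max? (first maximal element); paid.remove(m) removes the first
-- occurrence of a present element, which is List.erase — exact here since m ∈ paid.
def solutionGoB (n : Int) (k : Int) (paid : List Int) (i : Int) : List Int → Int
  | [] => i
  | e :: es =>
    let paid' := paid ++ [e]
    if e ≤ n then solutionGoB (n - e) k paid' (i + 1) es
    else if 0 < k then
      match PySem.List.max? paid' (fun y => y) with
      | some m => solutionGoB (n + m - e) (k - 1) (paid'.erase m) (i + 1) es
      | none => i                    -- unreachable: paid' contains e
    else i

def solution_alt (n : Int) (k : Int) (enemy : List Int) : Int :=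
  solutionGoB n k [] 0 enemy

-- ===== PRECONDITION & SPEC =====
def Spec_solution (n : Int) (k : Int) (enemy : List Int) (out : Int) : Prop := out = solution_alt n k enemy
instance (n : Int) (k : Int) (enemy : List Int) (out : Int) : Decidable (Spec_solution n k enemy out) := by unfold Spec_solution; infer_instance

-- ===== CLAIM (what is proved, stated in full; the proofs are below) =====
def Claim_equal_solution : Prop := ∀ (n : Int) (k : Int) (enemy : List Int), Dom_solution n k enemy → Spec_solution n k enemy (solution n k enemy)

-- ===== LEMMAS AND PROOFS =====

-- min? returns the extremal VALUE, so it is determined by the characterising properties.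
theorem pv_min?_eq_of {xs : List Int} {v : Int} (hmem : v ∈ xs) (hle : ∀ x ∈ xs, v ≤ x) :
    PySem.List.min? xs (fun y => y) = some v := by
  cases h : PySem.List.min? xs (fun y => y) with
  | none =>
    rw [PySem.List.min?_eq_none_iff] at h
    subst h; cases hmem
  | some w =>
    have hw := PySem.List.min?_mem h
    have hmin := PySem.List.min?_isMin h
    have h1 : v ≤ w := hle w hw
    have h2 : w ≤ v := by simpa using hmin v hmem
    have : w = v := by omega
    rw [this]

theorem pv_neg_injective : Function.Injective (fun x : Int => -x) := by
  intro a b h; simp at h; omega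

-- The core simulation: A's heap is a permutation of the negations of B's paid list; then the
-- two loops return the same answer from any common (n, k, ans) state.
theorem pv_go_eq (rest : List Int) : ∀ (n k ans : Int) (heap paid : List Int),
    heap.Perm (paid.map (fun x => -x)) →
    solutionGoA rest n k heap ans = solutionGoB n k paid ans rest := by
  induction rest with
  | nil => intro n k ans heap paid _; simp [solutionGoA, solutionGoB]
  | cons e rest ih =>
    intro n k ans heap paid hperm
    have hperm' : ((-e) :: heap).Perm ((paid ++ [e]).map (fun x => -x)) := by
      have h1 : ((-e) :: heap).Perm ((-e) :: paid.map (fun x => -x)) := hperm.cons (-e)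
      have h2 : ((-e) :: paid.map (fun x => -x)).Perm (paid.map (fun x => -x) ++ [-e]) :=
        List.perm_append_comm (l₁ := [(-e)]) (l₂ := paid.map (fun x => -x))
      have h3 : paid.map (fun x => -x) ++ [-e] = (paid ++ [e]).map (fun x => -x) := by simp
      exact (h1.trans h2).trans (h3 ▸ List.Perm.refl _)
    by_cases hn : n - e < 0
    · by_cases hk : k ≤ 0
      · simp only [solutionGoA, solutionGoB]
        rw [if_pos hn, if_pos hk, if_neg (by omega), if_neg (by omega)]
      · -- deficit and a skip available: A pops the heap minimum, B removes max(paid)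
        have hmem : e ∈ paid ++ [e] := by simp
        cases hmax : PySem.List.max? (paid ++ [e]) (fun y => y) with
        | none =>
          exfalso
          rw [PySem.List.max?_eq_none_iff] at hmax
          rw [hmax] at hmem; cases hmem
        | some m =>
          have hmMem : m ∈ paid ++ [e] := PySem.List.max?_mem hmax
          have hmMax : ∀ y ∈ paid ++ [e], y ≤ m := by
            intro y hy; simpa using PySem.List.max?_isMax hmax y hy
          have hmin : PySem.List.min? ((-e) :: heap) (fun y => y) = some (-m) := by
            apply pv_min?_eq_of
            · exact hperm'.mem_iff.mpr (List.mem_map.mpr ⟨m, hmMem, rfl⟩)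
            · intro x hx
              rcases List.mem_map.mp (hperm'.mem_iff.mp hx) with ⟨y, hy, rfl⟩
              have := hmMax y hy; omega
          have herase : (((-e) :: heap).erase (-m)).Perm
              (((paid ++ [e]).erase m).map (fun x => -x)) := by
            have h4 := hperm'.erase (-m)
            have h5 : ((paid ++ [e]).map (fun x => -x)).erase (-m) =
                ((paid ++ [e]).erase m).map (fun x => -x) :=
              (List.map_erase pv_neg_injective (paid ++ [e])).symm
            exact h5 ▸ h4
          simp only [solutionGoA, solutionGoB]
          rw [if_pos hn, if_neg hk, if_neg (by omega), if_pos (by omega), hmin, hmax]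
          show solutionGoA rest (n - e + -(-m)) (k - 1) (((-e) :: heap).erase (-m)) (ans + 1) =
            solutionGoB (n + m - e) (k - 1) ((paid ++ [e]).erase m) (ans + 1) rest
          rw [show n - e + -(-m) = n + m - e from by ring]
          exact ih (n + m - e) (k - 1) (ans + 1) _ _ herase
    · -- affordable round: both pay e; A keeps it on the heap, B appends it to the paid list
      simp only [solutionGoA, solutionGoB]
      rw [if_neg hn, if_pos (show e ≤ n by omega)]
      exact ih (n - e) k (ans + 1) _ _ hperm'

-- ===== VERDICT (by name: the statement is the Claim_ definition above) =====
theorem solution_spec : Claim_equal_solution := by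
  intro n k enemy _
  unfold Spec_solution solution solution_alt
  exact pv_go_eq enemy n k 0 [] [] (by simp)
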